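-- pv_equiv track=rewrite | github.com/ids-infotech/corsearch_project | MONGOLIA_APPLICATIONS_EXTRACTION.py | merge_duplicate_pages_for_application_screenshots_mongolia
-- ===== SOURCE A (Python) =====
-- def merge_duplicate_pages_for_application_screenshots_mongolia(content_data):
--     # Create a dictionary to store consolidated texts
--     consolidated_data = {}
--
--     for entry in content_data:
--         page_num = entry["text_on_page"]
--         text = entry["text"].strip()  # Remove any leading/trailing white spaces
--
--         # Skip the entry if the text is empty
--         if not text:
--             continue
--
--         if page_num not in consolidated_data:
--             consolidated_data[page_num] = text
--         else:
--             # Add a space before appending the next text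
--             consolidated_data[page_num] += " " + text
--
--     # Convert the consolidated data dictionary back to a list format
--     merged_data = [{"text_on_page": k, "text": v} for k, v in consolidated_data.items()]
--
--     # Optionally, sort the list by 'text_on_page' if needed
--     merged_data.sort(key=lambda x: x["text_on_page"])
--
--     return merged_data
-- ===== SOURCE B (Python) =====
-- def merge_duplicate_pages_for_application_screenshots_mongolia(content_data):
--     # Strip texts, drop empties, sort stably by page, then one consecutive-run
--     # scan builds the output directly in page order.
--     pairs = [(e["text_on_page"], e["text"].strip()) for e in content_data]
--     pairs = [(p, t) for (p, t) in pairs if t]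
--     pairs.sort(key=lambda pt: pt[0])
--     out = []
--     cur = None
--     for p, t in pairs:
--         if cur is not None and cur[0] == p:
--             cur = (cur[0], cur[1] + " " + t)
--         else:
--             if cur is not None:
--                 out.append({"text_on_page": cur[0], "text": cur[1]})
--             cur = (p, t)
--     if cur is not None:
--         out.append({"text_on_page": cur[0], "text": cur[1]})
--     return out
-- ===== Notes on version B (the rewrite author's own statement) =====
-- stated objective: alternative
-- what changed: Replaces A's dict keyed by page (built in input order, converted to a list and sorted at the end) with a filter-then-stable-sort of the stripped (page,text) pairs followed by a single consecutive-run scan that emits each merged page dict directly in sorted order.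
import Mathlib
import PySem

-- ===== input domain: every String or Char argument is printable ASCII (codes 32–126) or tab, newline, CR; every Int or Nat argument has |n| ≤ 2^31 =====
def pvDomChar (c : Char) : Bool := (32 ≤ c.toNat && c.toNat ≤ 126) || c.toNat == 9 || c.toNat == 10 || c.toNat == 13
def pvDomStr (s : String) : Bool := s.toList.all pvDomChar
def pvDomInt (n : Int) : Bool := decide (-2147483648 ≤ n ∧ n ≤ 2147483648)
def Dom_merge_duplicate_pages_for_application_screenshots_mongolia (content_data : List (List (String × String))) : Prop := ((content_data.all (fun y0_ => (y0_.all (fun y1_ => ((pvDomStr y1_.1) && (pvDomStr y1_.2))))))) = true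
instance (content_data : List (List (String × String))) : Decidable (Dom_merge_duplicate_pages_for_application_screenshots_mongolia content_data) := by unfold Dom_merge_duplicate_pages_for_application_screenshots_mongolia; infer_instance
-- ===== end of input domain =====

-- B replaces A's page-keyed dict (built in input order, listed and sorted at the end) by
-- filter + stable sort of the stripped (page, text) pairs + one consecutive-run scan emitting
-- the merged dicts directly in page order; equal cost, different structure (objective: alternative).

-- ===== PORT A =====
-- entry["k"]: first-match lookup in the association list; Python raises KeyError when the key
-- is absent — Pre_ requires both keys present, so the "" default is never reached there.
def pvLookup (e : List (String × String)) (k : String) : String :=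
  (PySem.Dict.mk e).getD k ""

def merge_duplicate_pages_for_application_screenshots_mongolia (content_data : List (List (String × String))) : List (List (String × String)) :=
  let consolidated := content_data.foldl (fun (d : PySem.Dict String String) entry =>
    let page_num := pvLookup entry "text_on_page"
    let text := PySem.Str.strip (pvLookup entry "text")
    if text = "" then d
    else if d.contains page_num then d.insert page_num (d.getD page_num "" ++ " " ++ text)
    else d.insert page_num text) PySem.Dict.empty
  let merged := consolidated.items.map (fun kv => [("text_on_page", kv.1), ("text", kv.2)])
  PySem.List.sorted merged (fun x => pvLookup x "text_on_page") false

-- ===== PORT B =====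
def pvEmit (c : String × String) : List (String × String) :=
  [("text_on_page", c.1), ("text", c.2)]

-- the body of B's run-merging loop (state: output so far, current open run)
def pvScanStep (acc : List (List (String × String)) × Option (String × String)) (pt : String × String) :
    List (List (String × String)) × Option (String × String) :=
  match acc.2 with
  | some c => if c.1 = pt.1 then (acc.1, some (c.1, c.2 ++ " " ++ pt.2))
              else (acc.1 ++ [pvEmit c], some pt)
  | none => (acc.1, some pt)

def merge_duplicate_pages_for_application_screenshots_mongolia_alt (content_data : List (List (String × String))) : List (List (String × String)) :=
  let pairs := (content_data.map (fun e => (pvLookup e "text_on_page", PySem.Str.strip (pvLookup e "text")))).filter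
    (fun pt => !(pt.2 == ""))
  let sortedPairs := PySem.List.sorted pairs (fun pt => pt.1) false
  let st := sortedPairs.foldl pvScanStep ([], none)
  match st.2 with
  | some c => st.1 ++ [pvEmit c]
  | none => st.1

-- ===== PRECONDITION & SPEC =====
-- Pre_: every entry carries both the "text_on_page" and the "text" key — exactly the inputs on
-- which Python's entry["text_on_page"] / entry["text"] do not raise KeyError.
def Pre_merge_duplicate_pages_for_application_screenshots_mongolia (content_data : List (List (String × String))) : Prop :=
  ∀ e ∈ content_data, "text_on_page" ∈ e.map Prod.fst ∧ "text" ∈ e.map Prod.fst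
instance (content_data : List (List (String × String))) : Decidable (Pre_merge_duplicate_pages_for_application_screenshots_mongolia content_data) := by unfold Pre_merge_duplicate_pages_for_application_screenshots_mongolia; infer_instance

def pvWitness_merge_duplicate_pages_for_application_screenshots_mongolia : (List (List (String × String))) :=
  [[("text_on_page", "1"), ("text", " a ")], [("text_on_page", "1"), ("text", "b")]]

def Spec_merge_duplicate_pages_for_application_screenshots_mongolia (content_data : List (List (String × String))) (out : List (List (String × String))) : Prop := out = merge_duplicate_pages_for_application_screenshots_mongolia_alt content_data
instance (content_data : List (List (String × String))) (out : List (List (String × String))) : Decidable (Spec_merge_duplicate_pages_for_application_screenshots_mongolia content_data out) := by unfold Spec_merge_duplicate_pages_for_application_screenshots_mongolia; infer_instance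

-- ===== CLAIM (what is proved, stated in full; the proofs are below) =====
def Claim_equal_merge_duplicate_pages_for_application_screenshots_mongolia : Prop := ∀ (content_data : List (List (String × String))), Dom_merge_duplicate_pages_for_application_screenshots_mongolia content_data → Pre_merge_duplicate_pages_for_application_screenshots_mongolia content_data → Spec_merge_duplicate_pages_for_application_screenshots_mongolia content_data (merge_duplicate_pages_for_application_screenshots_mongolia content_data)

-- ===== LEMMAS AND PROOFS =====

-- join with single spaces, the value a page accumulates
def pvJoinSp : List String → String
  | [] => ""
  | t :: r => r.foldl (fun a b => a ++ " " ++ b) t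

-- texts recorded for page p in the pair list l
def pvTexts (p : String) (l : List (String × String)) : List String :=
  (l.filter (fun q => q.1 == p)).map (fun q => q.2)

-- the merged (page, text) pairs, pages in first-occurrence order
def pvGroups (l : List (String × String)) : List (String × String) :=
  (PySem.List.dedup (l.map (fun q => q.1))).map (fun p => (p, pvJoinSp (pvTexts p l)))

-- the per-pair step of A's dict loop
def pvStepP (d : PySem.Dict String String) (pt : String × String) : PySem.Dict String String :=
  if pt.2 = "" then d
  else if d.contains pt.1 then d.insert pt.1 (d.getD pt.1 "" ++ " " ++ pt.2)
  else d.insert pt.1 pt.2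

lemma pvJoinSp_append (ts : List String) (t : String) :
    pvJoinSp (ts ++ [t]) = if ts = [] then t else pvJoinSp ts ++ " " ++ t := by
  cases ts with
  | nil => simp [pvJoinSp]
  | cons h r => simp [pvJoinSp, List.foldl_append]

lemma pvDedup_append (xs : List String) (x : String) :
    PySem.List.dedup (xs ++ [x]) =
      if x ∈ xs then PySem.List.dedup xs else PySem.List.dedup xs ++ [x] := by
  simp only [PySem.List.dedup_eq_ofList, PySem.Set.ofList_append_singleton, PySem.Set.add]
  by_cases hx : x ∈ xs
  · simp [PySem.Set.contains, PySem.Set.mem_ofList, hx]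
  · simp [hx, PySem.Set.contains, PySem.Set.mem_ofList]

lemma pvDedup_sublist (xs : List String) : (PySem.List.dedup xs).Sublist xs := by
  induction xs using List.reverseRecOn with
  | nil => simp [PySem.List.dedup]
  | append_singleton xs x ih =>
    rw [pvDedup_append]
    by_cases hx : x ∈ xs
    · simpa [hx] using ih.trans (List.sublist_append_left xs [x])
    · simpa [hx] using ih.append (List.Sublist.refl [x])

lemma pvItemsA (l : List (String × String)) (h : ∀ pt ∈ l, pt.2 ≠ "") :
    (l.foldl pvStepP PySem.Dict.empty).items = pvGroups l := by
  induction l using List.reverseRecOn with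
  | nil =>
    simp [pvGroups, PySem.List.dedup_eq_ofList, PySem.Set.ofList, PySem.Dict.empty]
  | append_singleton l x ih =>
    have hx2 : x.2 ≠ "" := h x (by simp)
    have hl : ∀ pt ∈ l, pt.2 ≠ "" := fun pt hpt => h pt (by simp [hpt])
    rw [List.foldl_append, List.foldl_cons, List.foldl_nil]
    have hitems : (l.foldl pvStepP PySem.Dict.empty).items = pvGroups l := ih hl
    set D := l.foldl pvStepP PySem.Dict.empty with hD
    have hkeys : D.keys = PySem.List.dedup (l.map (fun q => q.1)) := by
      simp only [PySem.Dict.keys, hitems, pvGroups, List.map_map]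
      rw [show ((fun q : String × String => q.1) ∘ fun p => (p, pvJoinSp (pvTexts p l))) = id from rfl,
        List.map_id]
    have hnodup : D.keys.Nodup := by rw [hkeys]; exact PySem.List.nodup_dedup _
    unfold pvStepP
    rw [if_neg hx2]
    by_cases hc : D.contains x.1 = true
    · have hmemk : x.1 ∈ D.keys := by
        have := PySem.Dict.contains_eq_decide_mem_keys D x.1
        rw [hc] at this; exact of_decide_eq_true this.symm
      have hmem : x.1 ∈ l.map (fun q => q.1) := by
        rw [hkeys, PySem.List.mem_dedup] at hmemk; exact hmemk
      have hmemd : x.1 ∈ PySem.List.dedup (l.map (fun q => q.1)) := by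
        rw [PySem.List.mem_dedup]; exact hmem
      have htne : pvTexts x.1 l ≠ [] := by
        obtain ⟨q, hq, hq1⟩ := List.mem_map.mp hmem
        intro hnil
        simp only [pvTexts, List.map_eq_nil_iff, List.filter_eq_nil_iff] at hnil
        exact absurd (by simp [hq1]) (hnil q hq)
      have hJmem : (x.1, pvJoinSp (pvTexts x.1 l)) ∈ D.items := by
        rw [hitems]; exact List.mem_map_of_mem hmemd
      have hgetD : D.getD x.1 "" = pvJoinSp (pvTexts x.1 l) :=
        PySem.Dict.getD_of_mem_items D hJmem hnodup ""
      rw [if_pos hc, PySem.Dict.items_insert_of_contains D _ hc, hitems, hgetD]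
      unfold pvGroups
      rw [List.map_map, List.map_append, List.map_cons, List.map_nil]
      rw [pvDedup_append, if_pos hmem]
      apply List.map_congr_left
      intro p hp
      by_cases hpx : p = x.1
      · subst hpx
        have hfx : List.filter (fun q' => q'.1 == x.1) [x] = [x] := by simp
        have htexts : pvTexts x.1 (l ++ [x]) = pvTexts x.1 l ++ [x.2] := by
          simp only [pvTexts, List.filter_append, hfx, List.map_append, List.map_cons, List.map_nil]
        simp only [Function.comp_apply, beq_self_eq_true, if_true]
        rw [htexts, pvJoinSp_append, if_neg htne]
      · have hxp : (x.1 == p) = false := beq_eq_false_iff_ne.mpr (fun h' => hpx h'.symm)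
        have hpxb : (p == x.1) = false := beq_eq_false_iff_ne.mpr hpx
        have htexts : pvTexts p (l ++ [x]) = pvTexts p l := by
          simp only [pvTexts, List.filter_append]
          simp [hxp]
        simp [Function.comp, hpxb, htexts]
    · have hcf : D.contains x.1 = false := by simpa using hc
      have hmemk : x.1 ∉ D.keys := by
        have := PySem.Dict.contains_eq_decide_mem_keys D x.1
        rw [hcf] at this
        intro hmem; exact absurd (decide_eq_true hmem) (by rw [← this]; simp)
      have hmem : x.1 ∉ l.map (fun q => q.1) := by
        rw [hkeys, PySem.List.mem_dedup] at hmemk; exact hmemk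
      have hfil : l.filter (fun q' => q'.1 == x.1) = [] := by
        refine List.filter_eq_nil_iff.mpr (fun q hq hbeq => ?_)
        exact hmem (List.mem_map.mpr ⟨q, hq, by simpa using hbeq⟩)
      have htnil : pvTexts x.1 l = [] := by
        simp only [pvTexts, hfil, List.map_nil]
      rw [if_neg hc, PySem.Dict.items_insert_of_not_contains D _ hcf, hitems]
      unfold pvGroups
      rw [List.map_append, List.map_cons, List.map_nil, pvDedup_append, if_neg hmem, List.map_append]
      congr 1
      · apply List.map_congr_left
        intro p hp
        have hpl : p ∈ l.map (fun q => q.1) := by rwa [PySem.List.mem_dedup] at hp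
        have hpx : p ≠ x.1 := fun h' => hmem (h' ▸ hpl)
        have hxp : (x.1 == p) = false := beq_eq_false_iff_ne.mpr (fun h' => hpx h'.symm)
        have htexts : pvTexts p (l ++ [x]) = pvTexts p l := by
          simp only [pvTexts, List.filter_append]
          simp [hxp]
        rw [htexts]
      · have htexts : pvTexts x.1 (l ++ [x]) = [x.2] := by
          simp only [pvTexts, List.filter_append, hfil]
          simp
        simp [htexts, pvJoinSp]

lemma pvPairwise_lt {l : List String} (h1 : l.Pairwise (· ≤ ·)) (h2 : l.Nodup) :
    l.Pairwise (· < ·) := by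
  induction l with
  | nil => exact List.Pairwise.nil
  | cons x t ih =>
    rw [List.pairwise_cons] at h1 ⊢
    rw [List.nodup_cons] at h2
    refine ⟨fun y hy => lt_of_le_of_ne (h1.1 y hy) (fun h' => h2.1 (h' ▸ hy)), ih h1.2 h2.2⟩

lemma pvFilter_insertBy {α : Type} (key : α → String) (c : String) (x : α) (ys : List α)
    (hys : ys.Pairwise (fun a b => key a ≤ key b)) :
    (PySem.List.insertBy (fun a b => decide (key a < key b)) x ys).filter (fun a => key a == c) =
      if key x = c then ys.filter (fun a => key a == c) ++ [x]
      else ys.filter (fun a => key a == c) := by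
  induction ys with
  | nil => by_cases h : key x = c <;> simp [PySem.List.insertBy, h]
  | cons y t ih =>
    rw [List.pairwise_cons] at hys
    by_cases hlt : key x < key y
    · rw [show PySem.List.insertBy (fun a b => decide (key a < key b)) x (y :: t) = x :: y :: t by
        simp [PySem.List.insertBy, hlt]]
      by_cases hxc : key x = c
      · have hfilnil : (y :: t).filter (fun a => key a == c) = [] := by
          refine List.filter_eq_nil_iff.mpr (fun a ha hbeq => ?_)
          have hac : key a = c := by simpa using hbeq
          have hlt' : c < key a := by
            rcases List.mem_cons.mp ha with h' | h'
            · rw [h']; exact hxc ▸ hlt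
            · exact lt_of_lt_of_le (hxc ▸ hlt) (hys.1 a h')
          exact absurd hac (ne_of_gt hlt')
        simp [hfilnil, hxc]
      · simp [hxc, beq_eq_false_iff_ne.mpr hxc]
    · rw [show PySem.List.insertBy (fun a b => decide (key a < key b)) x (y :: t) =
          y :: PySem.List.insertBy (fun a b => decide (key a < key b)) x t by
        simp [PySem.List.insertBy, hlt]]
      rw [List.filter_cons, ih hys.2]
      by_cases hyc : key y = c <;> by_cases hxc : key x = c <;>
        simp [hyc, hxc]

-- stability of Python's sort: the order of the elements with one given key value is preserved
lemma pvFilter_sorted {α : Type} (key : α → String) (xs : List α) (c : String) :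
    (PySem.List.sorted xs key false).filter (fun a => key a == c) =
      xs.filter (fun a => key a == c) := by
  induction xs using List.reverseRecOn with
  | nil => simp [PySem.List.sorted_eq_foldl_insertBy]
  | append_singleton xs x ih =>
    rw [PySem.List.sorted_eq_foldl_insertBy, List.foldl_append, List.foldl_cons, List.foldl_nil,
      ← PySem.List.sorted_eq_foldl_insertBy,
      pvFilter_insertBy key c x _ (PySem.List.sorted_pairwise xs key),
      ih, List.filter_append]
    by_cases hxc : key x = c
    · simp [hxc]
    · simp [hxc, beq_eq_false_iff_ne.mpr hxc]

lemma pvTexts_sorted (lc : List (String × String)) (p : String) :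
    pvTexts p (PySem.List.sorted lc (fun pt => pt.1) false) = pvTexts p lc := by
  unfold pvTexts
  rw [pvFilter_sorted (fun pt => pt.1) lc p]

lemma pvLe_getLast : ∀ (l : List String), l.Pairwise (· ≤ ·) → ∀ (hne : l ≠ []),
    ∀ y ∈ l, y ≤ l.getLast hne := by
  intro l
  induction l with
  | nil => intro _ hne; exact absurd rfl hne
  | cons x t ih =>
    intro hp hne y hy
    rw [List.pairwise_cons] at hp
    cases t with
    | nil =>
      rcases List.mem_cons.mp hy with h' | h'
      · subst h'; simp
      · cases h'
    | cons z s =>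
      rw [List.getLast_cons (by simp)]
      rcases List.mem_cons.mp hy with h' | h'
      · subst h'
        exact le_trans (hp.1 z (by simp)) (ih hp.2 (by simp) z (by simp))
      · exact ih hp.2 (by simp) y h'

lemma pvGetLast?_of_max {l : List String} (hlt : l.Pairwise (· < ·)) {a : String}
    (ha : a ∈ l) (hmax : ∀ y ∈ l, y ≤ a) : l.getLast? = some a := by
  induction l with
  | nil => cases ha
  | cons x t ih =>
    rw [List.pairwise_cons] at hlt
    cases t with
    | nil =>
      rcases List.mem_cons.mp ha with h' | h'
      · simp [h']
      · cases h'
    | cons z s =>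
      rw [List.getLast?_cons_cons]
      have hat : a ∈ z :: s := by
        rcases List.mem_cons.mp ha with h' | h'
        · exfalso
          have h1 : x < z := hlt.1 z (by simp)
          have h2 : z ≤ x := h' ▸ hmax z (by simp)
          exact absurd h2 (not_le.mpr h1)
        · exact h'
      exact ih hlt.2 hat (fun y hy => hmax y (by simp [hy]))

lemma pvDecomp {α : Type} {l : List α} {c : α} (h : l.getLast? = some c) :
    l.dropLast ++ [c] = l := by
  induction l with
  | nil => simp at h
  | cons y t ih =>
    cases t with
    | nil => simp at h; simp [h]
    | cons z s =>
      rw [List.getLast?_cons_cons] at h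
      show (y :: (z :: s).dropLast) ++ [c] = y :: z :: s
      rw [List.cons_append, ih h]

-- B's run-merging scan over a key-sorted list produces exactly the merged groups
lemma pvScan_groups (m : List (String × String)) (hm : m.Pairwise (fun a b => a.1 ≤ b.1)) :
    m.foldl pvScanStep ([], none) =
      ((pvGroups m).dropLast.map pvEmit, (pvGroups m).getLast?) := by
  induction m using List.reverseRecOn with
  | nil => simp [pvGroups, PySem.List.dedup_eq_ofList, PySem.Set.ofList]
  | append_singleton m x ih =>
    have hpm : m.Pairwise (fun a b => a.1 ≤ b.1) := hm.sublist (List.sublist_append_left m [x])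
    have hle : ∀ a ∈ m, a.1 ≤ x.1 := by
      have h' := (List.pairwise_append.mp hm).2.2
      exact fun a ha => h' a ha x (by simp)
    rw [List.foldl_append, List.foldl_cons, List.foldl_nil, ih hpm]
    rcases eq_or_ne m [] with hm0 | hm0
    · subst hm0
      simp [pvScanStep, pvGroups, pvTexts, pvJoinSp,
        PySem.List.dedup_eq_ofList, PySem.Set.ofList, PySem.Set.add, PySem.Set.contains]
    · have hmapne : m.map (fun q => q.1) ≠ [] := by simpa using hm0
      have hPle : (m.map (fun q => q.1)).Pairwise (· ≤ ·) := List.pairwise_map.mpr hpm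
      have hamem : (m.map (fun q => q.1)).getLast hmapne ∈ m.map (fun q => q.1) :=
        List.getLast_mem hmapne
      set a := (m.map (fun q => q.1)).getLast hmapne with ha
      have hamax : ∀ y ∈ m.map (fun q => q.1), y ≤ a := pvLe_getLast _ hPle hmapne
      set P := PySem.List.dedup (m.map (fun q => q.1)) with hPdef
      have hPlt : P.Pairwise (· < ·) :=
        pvPairwise_lt (hPle.sublist (pvDedup_sublist _)) (PySem.List.nodup_dedup _)
      have haP : a ∈ P := by rw [hPdef, PySem.List.mem_dedup]; exact hamem
      have haPmax : ∀ y ∈ P, y ≤ a := fun y hy =>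
        hamax y (by rwa [hPdef, PySem.List.mem_dedup] at hy)
      have hPlast : P.getLast? = some a := pvGetLast?_of_max hPlt haP haPmax
      have hPdecomp : P.dropLast ++ [a] = P := pvDecomp hPlast
      have hdropP : ∀ p ∈ P.dropLast, p < a := by
        intro p hp
        have h1 : (P.dropLast ++ [a]).Pairwise (· < ·) := by rw [hPdecomp]; exact hPlt
        exact (List.pairwise_append.mp h1).2.2 p hp a (by simp)
      have hGm : pvGroups m = P.dropLast.map (fun p => (p, pvJoinSp (pvTexts p m))) ++
          [(a, pvJoinSp (pvTexts a m))] := by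
        unfold pvGroups
        rw [← hPdef]
        conv_lhs => rw [← hPdecomp]
        rw [List.map_append, List.map_cons, List.map_nil]
      have hGlast : (pvGroups m).getLast? = some (a, pvJoinSp (pvTexts a m)) := by
        rw [hGm, List.getLast?_concat]
      have hGdrop : (pvGroups m).dropLast = P.dropLast.map (fun p => (p, pvJoinSp (pvTexts p m))) := by
        rw [hGm, List.dropLast_concat]
      rw [hGlast]
      simp only [pvScanStep]
      by_cases hax : x.1 ∈ m.map (fun q => q.1)
      · have hax1 : a = x.1 := by
          obtain ⟨q, hq, hq1⟩ := List.mem_map.mp hamem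
          exact le_antisymm (hq1 ▸ hle q hq) (hamax x.1 hax)
        have hdedup' : PySem.List.dedup ((m ++ [x]).map (fun q => q.1)) = P := by
          rw [List.map_append, List.map_cons, List.map_nil, pvDedup_append, if_pos hax, hPdef]
        have htne : pvTexts x.1 m ≠ [] := by
          obtain ⟨q, hq, hq1⟩ := List.mem_map.mp hax
          intro hnil
          simp only [pvTexts, List.map_eq_nil_iff, List.filter_eq_nil_iff] at hnil
          exact absurd (by simp [hq1]) (hnil q hq)
        have hfx : List.filter (fun q' => q'.1 == x.1) [x] = [x] := by simp
        have htexts : pvTexts x.1 (m ++ [x]) = pvTexts x.1 m ++ [x.2] := by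
          simp only [pvTexts, List.filter_append, hfx, List.map_append, List.map_cons, List.map_nil]
        have hGm' : pvGroups (m ++ [x]) =
            P.dropLast.map (fun p => (p, pvJoinSp (pvTexts p m))) ++
              [(a, pvJoinSp (pvTexts a m) ++ " " ++ x.2)] := by
          unfold pvGroups
          rw [hdedup']
          conv_lhs => rw [← hPdecomp]
          rw [List.map_append, List.map_cons, List.map_nil]
          congr 1
          · apply List.map_congr_left
            intro p hp
            have hpx : p ≠ x.1 := fun h' => absurd (hax1 ▸ h' ▸ hdropP p hp) (lt_irrefl _)
            have hxp : (x.1 == p) = false := beq_eq_false_iff_ne.mpr (fun h' => hpx h'.symm)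
            have ht' : pvTexts p (m ++ [x]) = pvTexts p m := by
              simp only [pvTexts, List.filter_append]
              simp [hxp]
            rw [ht']
          · rw [hax1, htexts, pvJoinSp_append, if_neg htne]
        rw [if_pos hax1, hGm', List.dropLast_concat, List.getLast?_concat, hGdrop]
      · have hanx : a ≠ x.1 := fun h' => hax (h' ▸ hamem)
        have hdedup' : PySem.List.dedup ((m ++ [x]).map (fun q => q.1)) = P ++ [x.1] := by
          rw [List.map_append, List.map_cons, List.map_nil, pvDedup_append, if_neg hax, hPdef]
        have hfil : m.filter (fun q' => q'.1 == x.1) = [] := by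
          refine List.filter_eq_nil_iff.mpr (fun q hq hbeq => ?_)
          exact hax (List.mem_map.mpr ⟨q, hq, by simpa using hbeq⟩)
        have htexts : pvTexts x.1 (m ++ [x]) = [x.2] := by
          simp only [pvTexts, List.filter_append, hfil]
          simp
        have hGm' : pvGroups (m ++ [x]) = pvGroups m ++ [(x.1, x.2)] := by
          unfold pvGroups
          rw [hdedup', List.map_append, List.map_cons, List.map_nil, ← hPdef]
          congr 1
          · apply List.map_congr_left
            intro p hp
            have hpP : p ∈ m.map (fun q => q.1) := by rwa [hPdef, PySem.List.mem_dedup] at hp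
            have hpx : p ≠ x.1 := fun h' => hax (h' ▸ hpP)
            have hxp : (x.1 == p) = false := beq_eq_false_iff_ne.mpr (fun h' => hpx h'.symm)
            have ht' : pvTexts p (m ++ [x]) = pvTexts p m := by
              simp only [pvTexts, List.filter_append]
              simp [hxp]
            rw [ht']
          · rw [htexts]
            simp [pvJoinSp]
        rw [if_neg hanx, hGm', List.dropLast_concat, List.getLast?_concat]
        rw [show (pvGroups m).map pvEmit =
            (pvGroups m).dropLast.map pvEmit ++ [pvEmit (a, pvJoinSp (pvTexts a m))] from by
          conv_lhs => rw [← pvDecomp hGlast]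
          rw [List.map_append, List.map_cons, List.map_nil]]

def pvF (e : List (String × String)) : String × String :=
  (pvLookup e "text_on_page", PySem.Str.strip (pvLookup e "text"))

def pvClean (cd : List (List (String × String))) : List (String × String) :=
  (cd.map pvF).filter (fun pt => !(pt.2 == ""))

-- the common normal form both ports are proved equal to
def pvT (cd : List (List (String × String))) : List (List (String × String)) :=
  (PySem.List.sorted (PySem.List.dedup ((pvClean cd).map (fun q => q.1))) (fun p => p) false).map
    (fun p => pvEmit (p, pvJoinSp (pvTexts p (pvClean cd))))

lemma pvKey_emit (c : String × String) : pvLookup (pvEmit c) "text_on_page" = c.1 := rfl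

lemma pvClean_ne (cd : List (List (String × String))) :
    ∀ pt ∈ pvClean cd, pt.2 ≠ "" := fun pt hpt => by
  simpa using (List.mem_filter.mp hpt).2

lemma pvFoldl_filter (l : List (String × String)) (d : PySem.Dict String String) :
    l.foldl pvStepP d = (l.filter (fun pt => !(pt.2 == ""))).foldl pvStepP d := by
  induction l generalizing d with
  | nil => rfl
  | cons pt t ih =>
    by_cases h : pt.2 = ""
    · rw [List.foldl_cons, show pvStepP d pt = d from by simp [pvStepP, h], List.filter_cons,
        if_neg (by simp [h]), ih]
    · rw [List.foldl_cons, List.filter_cons, if_pos (by simpa using h), List.foldl_cons, ih]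

lemma pvAssemble (gs : List (String × String)) :
    (match gs.getLast? with
      | some c => gs.dropLast.map pvEmit ++ [pvEmit c]
      | none => gs.dropLast.map pvEmit) = gs.map pvEmit := by
  induction gs using List.reverseRecOn with
  | nil => rfl
  | append_singleton gs c _ =>
    rw [List.getLast?_concat, List.dropLast_concat]
    simp

lemma pvA_eq (cd : List (List (String × String))) :
    merge_duplicate_pages_for_application_screenshots_mongolia cd = pvT cd := by
  show PySem.List.sorted ((cd.foldl (fun d e => pvStepP d (pvF e)) PySem.Dict.empty).items.map pvEmit)
      (fun x => pvLookup x "text_on_page") false = pvT cd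
  rw [← List.foldl_map, pvFoldl_filter]
  rw [show ((cd.map pvF).filter (fun pt => !(pt.2 == ""))) = pvClean cd from rfl]
  rw [pvItemsA _ (pvClean_ne cd)]
  apply PySem.List.sorted_eq_of_perm_of_pairwise_lt
  · unfold pvT pvGroups
    rw [List.map_map]
    exact (PySem.List.sorted_perm _ _ _).map _
  · unfold pvT
    refine List.pairwise_map.mpr ?_
    have hS := PySem.List.sorted_ofList_pairwise_lt ((pvClean cd).map (fun q => q.1))
    rw [← PySem.List.dedup_eq_ofList] at hS
    exact hS.imp (fun {p q} h' => by simpa [pvKey_emit] using h')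

lemma pvB_eq (cd : List (List (String × String))) :
    merge_duplicate_pages_for_application_screenshots_mongolia_alt cd = pvT cd := by
  have hpair : (PySem.List.sorted (pvClean cd) (fun pt => pt.1) false).Pairwise
      (fun a b => a.1 ≤ b.1) := PySem.List.sorted_pairwise _ _
  set m := PySem.List.sorted (pvClean cd) (fun pt => pt.1) false with hmdef
  show (match (m.foldl pvScanStep ([], none)).2 with
    | some c => (m.foldl pvScanStep ([], none)).1 ++ [pvEmit c]
    | none => (m.foldl pvScanStep ([], none)).1) = pvT cd
  rw [pvScan_groups m hpair, pvAssemble]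
  have hdd : PySem.List.dedup (m.map (fun q => q.1)) =
      PySem.List.sorted (PySem.List.dedup ((pvClean cd).map (fun q => q.1))) (fun p => p) false := by
    symm
    apply PySem.List.sorted_eq_of_perm_of_pairwise_lt
    · refine (List.perm_ext_iff_of_nodup (PySem.List.nodup_dedup _) (PySem.List.nodup_dedup _)).mpr ?_
      intro y
      rw [PySem.List.mem_dedup, PySem.List.mem_dedup]
      exact ((PySem.List.sorted_perm _ _ _).map _).mem_iff
    · exact pvPairwise_lt ((List.pairwise_map.mpr hpair).sublist (pvDedup_sublist _))
        (PySem.List.nodup_dedup _)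
  have hgroups : pvGroups m =
      (PySem.List.sorted (PySem.List.dedup ((pvClean cd).map (fun q => q.1))) (fun p => p) false).map
        (fun p => (p, pvJoinSp (pvTexts p (pvClean cd)))) := by
    unfold pvGroups
    rw [hdd]
    apply List.map_congr_left
    intro p hp
    rw [hmdef, pvTexts_sorted]
  rw [hgroups]
  unfold pvT
  rw [List.map_map]
  rfl

-- ===== VERDICT (by name: the statement is the Claim_ definition above) =====
theorem merge_duplicate_pages_for_application_screenshots_mongolia_spec : Claim_equal_merge_duplicate_pages_for_application_screenshots_mongolia := by
  intro cd _ _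
  unfold Spec_merge_duplicate_pages_for_application_screenshots_mongolia
  rw [pvA_eq, pvB_eq]
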